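-- pv_equiv track=rewrite | github.com/leephanna/ai4u-top10-backend | app.py | intelligent_category_analysis
-- ===== SOURCE A (Python) =====
-- def intelligent_category_analysis(prompt: str):
--     p = (prompt or "").lower()
--     if any(w in p for w in ['food', 'snack', 'chips', 'candy', 'coffee', 'tea', 'organic', 'grocery']):
--         return {'category': 'grocery', 'search_terms': f"{prompt} food"}
--     if any(w in p for w in ['baby', 'diaper', 'infant', 'toddler', 'kids', 'children']):
--         return {'category': 'baby', 'search_terms': f"{prompt} baby"}
--     if any(w in p for w in ['skincare', 'beauty', 'makeup', 'cosmetic', 'anti-aging']):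
--         return {'category': 'beauty', 'search_terms': f"{prompt} beauty"}
--     if any(w in p for w in ['phone', 'smartphone', 'laptop', 'headphone', 'gaming']):
--         return {'category': 'electronics', 'search_terms': prompt}
--     return {'category': 'general', 'search_terms': prompt}
-- ===== SOURCE B (Python) =====
-- KEYWORD_CATS = [
--     ('food', 'grocery'), ('snack', 'grocery'), ('chips', 'grocery'),
--     ('candy', 'grocery'), ('coffee', 'grocery'), ('tea', 'grocery'),
--     ('organic', 'grocery'), ('grocery', 'grocery'),
--     ('baby', 'baby'), ('diaper', 'baby'), ('infant', 'baby'),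
--     ('toddler', 'baby'), ('kids', 'baby'), ('children', 'baby'),
--     ('skincare', 'beauty'), ('beauty', 'beauty'), ('makeup', 'beauty'),
--     ('cosmetic', 'beauty'), ('anti-aging', 'beauty'),
--     ('phone', 'electronics'), ('smartphone', 'electronics'),
--     ('laptop', 'electronics'), ('headphone', 'electronics'),
--     ('gaming', 'electronics'),
-- ]
--
-- PRIORITY = [('grocery', ' food'), ('baby', ' baby'),
--             ('beauty', ' beauty'), ('electronics', '')]
--
--
-- def intelligent_category_analysis(prompt: str):
--     p = (prompt or "").lower()
--     # stage 1: one exhaustive flat pass collecting every matched category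
--     hits = [cat for w, cat in KEYWORD_CATS if w in p]
--     # stage 2: pick the highest-priority matched category
--     for cat, suffix in PRIORITY:
--         if cat in hits:
--             return {'category': cat, 'search_terms': prompt + suffix}
--     return {'category': 'general', 'search_terms': prompt}
-- ===== Notes on version B (the rewrite author's own statement) =====
-- stated objective: alternative
-- what changed: A short-circuits through four hard-coded if/any blocks, one per category; B instead runs one exhaustive flat pass over a keyword->category table collecting ALL matched categories, then a separate priority-selection stage picks the winning category; correct because a category wins in A iff some of its keywords occurs and no earlier category has a hit, which is exactly what priority selection over the complete hit list computes.
import Mathlib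
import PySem

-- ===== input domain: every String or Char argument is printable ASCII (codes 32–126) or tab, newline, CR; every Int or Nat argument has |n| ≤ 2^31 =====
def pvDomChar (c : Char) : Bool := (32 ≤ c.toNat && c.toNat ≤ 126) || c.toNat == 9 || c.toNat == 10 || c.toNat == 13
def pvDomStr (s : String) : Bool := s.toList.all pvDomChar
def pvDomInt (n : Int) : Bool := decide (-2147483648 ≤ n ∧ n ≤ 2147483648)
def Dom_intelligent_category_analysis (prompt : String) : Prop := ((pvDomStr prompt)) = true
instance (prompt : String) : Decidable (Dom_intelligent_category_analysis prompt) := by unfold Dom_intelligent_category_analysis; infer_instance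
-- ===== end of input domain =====

-- B replaces A's short-circuiting if/any chain by two stages: an exhaustive flat pass
-- over a keyword→category table collecting all matched categories, then a priority
-- selection over that hit list (alternative decomposition; same cost, same value).

-- ===== PORT A =====
-- `(prompt or "").lower()`: for strings `prompt or ""` is `prompt` itself (falsy prompt is ""), so p = prompt.lower(); exact.
def intelligent_category_analysis (prompt : String) : List (String × String) :=
  let p := PySem.Str.lower prompt
  if ["food", "snack", "chips", "candy", "coffee", "tea", "organic", "grocery"].any
      (fun w => PySem.Str.isIn w p) then
    [("category", "grocery"), ("search_terms", prompt ++ " food")]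
  else if ["baby", "diaper", "infant", "toddler", "kids", "children"].any
      (fun w => PySem.Str.isIn w p) then
    [("category", "baby"), ("search_terms", prompt ++ " baby")]
  else if ["skincare", "beauty", "makeup", "cosmetic", "anti-aging"].any
      (fun w => PySem.Str.isIn w p) then
    [("category", "beauty"), ("search_terms", prompt ++ " beauty")]
  else if ["phone", "smartphone", "laptop", "headphone", "gaming"].any
      (fun w => PySem.Str.isIn w p) then
    [("category", "electronics"), ("search_terms", prompt)]
  else
    [("category", "general"), ("search_terms", prompt)]

-- ===== PORT B =====
def icaKeywordCats : List (String × String) :=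
  [ ("food", "grocery"), ("snack", "grocery"), ("chips", "grocery"),
    ("candy", "grocery"), ("coffee", "grocery"), ("tea", "grocery"),
    ("organic", "grocery"), ("grocery", "grocery"),
    ("baby", "baby"), ("diaper", "baby"), ("infant", "baby"),
    ("toddler", "baby"), ("kids", "baby"), ("children", "baby"),
    ("skincare", "beauty"), ("beauty", "beauty"), ("makeup", "beauty"),
    ("cosmetic", "beauty"), ("anti-aging", "beauty"),
    ("phone", "electronics"), ("smartphone", "electronics"),
    ("laptop", "electronics"), ("headphone", "electronics"),
    ("gaming", "electronics") ]

def icaPriority : List (String × String) :=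
  [("grocery", " food"), ("baby", " baby"), ("beauty", " beauty"), ("electronics", "")]

-- stage 2: the `for cat, suffix in PRIORITY` loop with early return
def icaSelect (prompt : String) (hits : List String) : List (String × String) → List (String × String)
  | [] => [("category", "general"), ("search_terms", prompt)]
  | (cat, suffix) :: rest =>
    if hits.contains cat then
      [("category", cat), ("search_terms", prompt ++ suffix)]
    else icaSelect prompt hits rest

def intelligent_category_analysis_alt (prompt : String) : List (String × String) :=
  let p := PySem.Str.lower prompt
  -- stage 1: exhaustive flat pass, the list comprehension
  let hits := (icaKeywordCats.filter (fun wc => PySem.Str.isIn wc.1 p)).map Prod.snd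
  icaSelect prompt hits icaPriority

-- ===== PRECONDITION & SPEC =====
def Spec_intelligent_category_analysis (prompt : String) (out : List (String × String)) : Prop := out = intelligent_category_analysis_alt prompt
instance (prompt : String) (out : List (String × String)) : Decidable (Spec_intelligent_category_analysis prompt out) := by unfold Spec_intelligent_category_analysis; infer_instance

-- ===== CLAIM (what is proved, stated in full; the proofs are below) =====
def Claim_equal_intelligent_category_analysis : Prop := ∀ (prompt : String), Dom_intelligent_category_analysis prompt → Spec_intelligent_category_analysis prompt (intelligent_category_analysis prompt)

-- ===== LEMMAS AND PROOFS =====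

-- membership in the filtered-and-projected hit list = one flat `any` over the table
theorem ica_contains_filter_map {α β : Type} [BEq β] [LawfulBEq β] (q : α → Bool) (f : α → β)
    (c : β) (l : List α) :
    ((l.filter q).map f).contains c = l.any (fun a => q a && (f a == c)) := by
  induction l with
  | nil => rfl
  | cons a t ih =>
    by_cases h : q a = true <;>
      simp [h, List.any_cons, BEq.comm, -List.contains_eq_mem, ih]

-- ===== VERDICT (by name: the statement is the Claim_ definition above) =====
set_option maxHeartbeats 1600000 in
theorem intelligent_category_analysis_spec : Claim_equal_intelligent_category_analysis := by
  intro prompt _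
  unfold Spec_intelligent_category_analysis intelligent_category_analysis
    intelligent_category_analysis_alt
  simp only [icaSelect, ica_contains_filter_map, icaKeywordCats, icaPriority,
    List.any_cons, List.any_nil]
  simp only [beq_self_eq_true, Bool.and_true, Bool.or_false, Bool.false_or,
    Bool.and_false, String.reduceBEq]
  split_ifs <;> simp
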